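-- pv_equiv track=rewrite | github.com/Nghia03092004/nghia03092004.github.io | project_euler/problem_882/solution.py | count_equations
-- ===== SOURCE A (Python) =====
-- COST = {0: 6, 1: 2, 2: 5, 3: 5, 4: 4, 5: 5, 6: 6, 7: 3, 8: 7, 9: 6}
--
-- def matchstick_cost(n):
--     """Total matchstick cost of displaying number n."""
--     if n == 0:
--         return COST[0]
--     total = 0
--     while n > 0:
--         total += COST[n % 10]
--         n //= 10
--     return total
--
-- def count_equations(budget):
--     """Count valid A + B = C where total matchstick cost = budget.
--     Budget includes 4 for the + and = signs."""
--     remaining = budget - 4  # matchsticks for A, B, C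
--     if remaining <= 0:
--         return 0
--     count = 0
--     # Enumerate small A, B
--     for A in range(0, 200):
--         cA = matchstick_cost(A)
--         if cA > remaining:
--             continue
--         for B in range(A, 200):  # A <= B to avoid double counting
--             cB = matchstick_cost(B)
--             if cA + cB >= remaining:
--                 continue
--             C = A + B
--             cC = matchstick_cost(C)
--             if cA + cB + cC == remaining:
--                 count += 1
--     return count
-- ===== SOURCE B (Python) =====
-- COST = {0: 6, 1: 2, 2: 5, 3: 5, 4: 4, 5: 5, 6: 6, 7: 3, 8: 7, 9: 6}
--
-- def matchstick_cost(n):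
--     """Total matchstick cost of displaying number n."""
--     if n == 0:
--         return COST[0]
--     total = 0
--     while n > 0:
--         total += COST[n % 10]
--         n //= 10
--     return total
--
-- def count_equations(budget):
--     """Count valid A + B = C where total matchstick cost = budget.
--     Enumerates by the sum C; for each C the cost of C is computed once."""
--     remaining = budget - 4
--     if remaining <= 0:
--         return 0
--     count = 0
--     for C in range(0, 399):
--         cC = matchstick_cost(C)
--         for A in range(max(0, C - 199), C // 2 + 1):
--             if matchstick_cost(A) + matchstick_cost(C - A) + cC == remaining:
--                 count += 1
--     return count
-- ===== Notes on version B (the rewrite author's own statement) =====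
-- stated objective: alternative
-- what changed: B enumerates solutions by the sum C (0..398), deriving each pair as (A, C-A) with A in [max(0,C-199), C//2], instead of A's nested loops over A and B; the cost of C is computed once per C and the redundant cost guards are dropped.
import Mathlib
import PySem

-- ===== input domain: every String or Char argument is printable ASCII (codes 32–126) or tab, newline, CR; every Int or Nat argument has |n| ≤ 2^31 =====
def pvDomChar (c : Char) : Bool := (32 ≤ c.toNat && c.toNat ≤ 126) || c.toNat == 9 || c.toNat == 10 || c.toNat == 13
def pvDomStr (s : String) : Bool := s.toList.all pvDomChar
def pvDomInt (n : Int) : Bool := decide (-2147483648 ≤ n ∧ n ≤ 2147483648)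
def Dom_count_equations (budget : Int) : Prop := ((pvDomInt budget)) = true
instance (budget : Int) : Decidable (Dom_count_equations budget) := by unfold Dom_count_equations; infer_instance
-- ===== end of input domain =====

set_option maxRecDepth 10000


-- B enumerates the same A ≤ B pairs by their sum C (computing the cost of C once per C) — an alternative decomposition proved to return the same count.

-- ===== PORT A =====
def COST : PySem.Dict Int Int :=
  PySem.Dict.ofList [(0, 6), (1, 2), (2, 5), (3, 5), (4, 4), (5, 5), (6, 6), (7, 3), (8, 7), (9, 6)]

-- while n > 0: total += COST[n % 10]; n //= 10
-- fuel-bounded structural recursion so the kernel can evaluate it; fuel n.toNat is enough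
-- (n // 10 loses at least one from n.toNat each round), so this is exact.
-- COST[n % 10] is ported as .get? followed by .getD 0: n % 10 is always a key of COST
-- (mod of a positive divisor lies in [0, 10)), so no KeyError arises and the default is dead.
def matchstick_loop : Nat → Int → Int → Int
  | 0, _, total => total
  | fuel + 1, n, total =>
    if n > 0 then
      matchstick_loop fuel (PySem.Int.floordiv n 10) (total + (COST.get? (PySem.Int.mod n 10)).getD 0)
    else total

def matchstick_cost (n : Int) : Int :=
  if n = 0 then (COST.get? 0).getD 0
  else matchstick_loop n.toNat n 0

def count_equations (budget : Int) : Int :=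
  let remaining := budget - 4
  if remaining ≤ 0 then 0
  else
    (PySem.List.pyRange 0 200 1).foldl (fun count A =>
      let cA := matchstick_cost A
      if cA > remaining then count
      else
        (PySem.List.pyRange A 200 1).foldl (fun count B =>
          let cB := matchstick_cost B
          if cA + cB ≥ remaining then count
          else
            let C := A + B
            let cC := matchstick_cost C
            if cA + cB + cC = remaining then count + 1 else count) count) 0

-- ===== PORT B =====
def count_equations_alt (budget : Int) : Int :=
  let remaining := budget - 4
  if remaining ≤ 0 then 0
  else
    (PySem.List.pyRange 0 399 1).foldl (fun count C =>
      let cC := matchstick_cost C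
      (PySem.List.pyRange (max 0 (C - 199)) (PySem.Int.floordiv C 2 + 1) 1).foldl (fun count A =>
        if matchstick_cost A + matchstick_cost (C - A) + cC = remaining then count + 1
        else count) count) 0

-- ===== PRECONDITION & SPEC =====
def Spec_count_equations (budget : Int) (out : Int) : Prop := out = count_equations_alt budget
instance (budget : Int) (out : Int) : Decidable (Spec_count_equations budget out) := by unfold Spec_count_equations; infer_instance

-- ===== CLAIM (what is proved, stated in full; the proofs are below) =====
def Claim_equal_count_equations : Prop := ∀ (budget : Int), Dom_count_equations budget → Spec_count_equations budget (count_equations budget)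

-- ===== LEMMAS AND PROOFS =====

-- every number fed to matchstick_cost here lies in [0, 399); its cost is ≥ 1 there
theorem cost_pos_tbl : ∀ n ∈ PySem.List.pyRange 0 399 1, 1 ≤ matchstick_cost n := by decide

theorem cost_pos (n : Int) (h0 : 0 ≤ n) (h1 : n < 399) : 1 ≤ matchstick_cost n :=
  cost_pos_tbl n (by rw [PySem.List.mem_pyRange_one]; exact ⟨h0, h1⟩)

-- the pair lists each port walks, and the predicates each port counts
def pairsA : List (Int × Int) :=
  (PySem.List.pyRange 0 200 1).flatMap (fun A => (PySem.List.pyRange A 200 1).map (fun B => (A, B)))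

def pairsB : List (Int × Int) :=
  (PySem.List.pyRange 0 399 1).flatMap (fun C =>
    (PySem.List.pyRange (max 0 (C - 199)) (PySem.Int.floordiv C 2 + 1) 1).map (fun A => (C, A)))

def predA (r : Int) (z : Int × Int) : Bool :=
  decide (matchstick_cost z.1 + matchstick_cost z.2 + matchstick_cost (z.1 + z.2) = r)

def predB (r : Int) (z : Int × Int) : Bool :=
  decide (matchstick_cost z.2 + matchstick_cost (z.1 - z.2) + matchstick_cost z.1 = r)

-- a nested counting loop is countP over the flattened pair list
theorem nested_count (p : Int → Int → Prop) [inst : ∀ x y, Decidable (p x y)]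
    (l : List Int) (f : Int → List Int) (init : Int) :
    l.foldl (fun acc x => (f x).foldl (fun acc y => if p x y then acc + 1 else acc) acc) init
      = init + (((l.flatMap (fun x => (f x).map (fun y => (x, y)))).countP
          (fun z => decide (p z.1 z.2)) : Nat) : Int) := by
  induction l generalizing init with
  | nil => simp
  | cons x xs ih =>
    simp only [List.foldl_cons, List.flatMap_cons, List.countP_append, List.countP_map]
    rw [PySem.List.foldl_ite_add_one, ih]
    push_cast
    have hcomp : ((fun z : Int × Int => decide (p z.1 z.2)) ∘ fun y => (x, y))
        = fun y => decide (p x y) := rfl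
    rw [hcomp]
    ring

theorem portA_count (budget : Int) (hr : 0 < budget - 4) :
    count_equations budget = ((pairsA.countP (predA (budget - 4)) : Nat) : Int) := by
  have hif : ¬ (budget - 4 ≤ 0) := by omega
  show (if budget - 4 ≤ 0 then (0 : Int) else _) = _
  rw [if_neg hif]
  rw [PySem.List.foldl_congr_mem' (g := fun count A =>
      (PySem.List.pyRange A 200 1).foldl (fun acc B =>
        if matchstick_cost A + matchstick_cost B + matchstick_cost (A + B) = budget - 4
        then acc + 1 else acc) count)]
  · rw [nested_count (fun A B =>
        matchstick_cost A + matchstick_cost B + matchstick_cost (A + B) = budget - 4)]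
    unfold predA pairsA
    rw [zero_add]
  · intro A hA count
    rw [PySem.List.mem_pyRange_one] at hA
    by_cases hg : matchstick_cost A > budget - 4
    · rw [if_pos hg, PySem.List.foldl_ite_add_one]
      have hz : (PySem.List.pyRange A 200 1).countP (fun B =>
          decide (matchstick_cost A + matchstick_cost B + matchstick_cost (A + B) = budget - 4)) = 0 := by
        rw [List.countP_eq_zero]
        intro B hB
        rw [PySem.List.mem_pyRange_one] at hB
        have h1 : 1 ≤ matchstick_cost B := cost_pos B (by omega) (by omega)
        have h2 : 1 ≤ matchstick_cost (A + B) := cost_pos (A + B) (by omega) (by omega)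
        simp only [decide_eq_true_eq]
        omega
      rw [hz]
      simp
    · rw [if_neg hg]
      apply PySem.List.foldl_congr_mem'
      intro B hB acc
      rw [PySem.List.mem_pyRange_one] at hB
      have h2 : 1 ≤ matchstick_cost (A + B) := cost_pos (A + B) (by omega) (by omega)
      by_cases hge : matchstick_cost A + matchstick_cost B ≥ budget - 4
      · rw [if_pos hge, if_neg (by omega)]
      · rw [if_neg hge]

theorem portB_count (budget : Int) (hr : 0 < budget - 4) :
    count_equations_alt budget = ((pairsB.countP (predB (budget - 4)) : Nat) : Int) := by
  have hif : ¬ (budget - 4 ≤ 0) := by omega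
  show (if budget - 4 ≤ 0 then (0 : Int) else _) = _
  rw [if_neg hif]
  rw [nested_count (fun C A =>
      matchstick_cost A + matchstick_cost (C - A) + matchstick_cost C = budget - 4)]
  unfold predB pairsB
  rw [zero_add]

def phi (z : Int × Int) : Int × Int := (z.1 + z.2, z.1)

theorem phi_inj : Function.Injective phi := by
  intro a b h
  unfold phi at h
  have h1 : a.1 + a.2 = b.1 + b.2 := congrArg Prod.fst h
  have h2 : a.1 = b.1 := congrArg Prod.snd h
  have : a.2 = b.2 := by omega
  exact Prod.ext h2 this

theorem pairsA_nodup : pairsA.Nodup := by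
  unfold pairsA
  rw [List.nodup_flatMap]
  constructor
  · intro A hA
    exact (PySem.List.nodup_pyRange_one _ _).map (fun B B' h => congrArg Prod.snd h)
  · apply List.Pairwise.imp (R := (· < ·))
    · intro A A' hlt
      simp only [List.disjoint_left]
      intro z hz hz'
      simp only [List.mem_map] at hz hz'
      obtain ⟨B, _, rfl⟩ := hz
      obtain ⟨B', _, h⟩ := hz'
      have : A' = A := congrArg Prod.fst h
      omega
    · exact PySem.List.pairwise_lt_pyRange_one 0 200

theorem pairsB_nodup : pairsB.Nodup := by
  unfold pairsB
  rw [List.nodup_flatMap]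
  constructor
  · intro C hC
    exact (PySem.List.nodup_pyRange_one _ _).map (fun A A' h => congrArg Prod.snd h)
  · apply List.Pairwise.imp (R := (· < ·))
    · intro C C' hlt
      simp only [List.disjoint_left]
      intro z hz hz'
      simp only [List.mem_map] at hz hz'
      obtain ⟨A, _, rfl⟩ := hz
      obtain ⟨A', _, h⟩ := hz'
      have : C' = C := congrArg Prod.fst h
      omega
    · exact PySem.List.pairwise_lt_pyRange_one 0 399

theorem mem_pairsA (z : Int × Int) :
    z ∈ pairsA ↔ 0 ≤ z.1 ∧ z.1 ≤ z.2 ∧ z.2 < 200 := by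
  unfold pairsA
  simp only [List.mem_flatMap, List.mem_map, PySem.List.mem_pyRange_one]
  constructor
  · rintro ⟨A, ⟨hA1, hA2⟩, B, ⟨hB1, hB2⟩, rfl⟩
    exact ⟨hA1, hB1, hB2⟩
  · rintro ⟨h1, h2, h3⟩
    exact ⟨z.1, ⟨h1, by omega⟩, z.2, ⟨h2, h3⟩, rfl⟩

theorem mem_pairsB (z : Int × Int) :
    z ∈ pairsB ↔ 0 ≤ z.1 ∧ z.1 < 399 ∧ z.1 - 199 ≤ z.2 ∧ 0 ≤ z.2 ∧ z.2 * 2 ≤ z.1 := by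
  unfold pairsB
  simp only [List.mem_flatMap, List.mem_map, PySem.List.mem_pyRange_one]
  constructor
  · rintro ⟨C, ⟨hC1, hC2⟩, A, ⟨hA1, hA2⟩, rfl⟩
    have : A ≤ PySem.Int.floordiv C 2 := by omega
    rw [PySem.Int.le_floordiv_iff_mul_le (by norm_num : (0:Int) < 2)] at this
    exact ⟨hC1, hC2, by omega, by omega, this⟩
  · rintro ⟨h1, h2, h3, h4, h5⟩
    refine ⟨z.1, ⟨h1, h2⟩, z.2, ⟨by omega, ?_⟩, rfl⟩
    have : z.2 ≤ PySem.Int.floordiv z.1 2 := by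
      rw [PySem.Int.le_floordiv_iff_mul_le (by norm_num : (0:Int) < 2)]
      exact h5
    omega

theorem filters_perm (r : Int) :
    ((pairsA.filter (predA r)).map phi).Perm (pairsB.filter (predB r)) := by
  rw [List.perm_ext_iff_of_nodup
      ((pairsA_nodup.filter _).map phi_inj)
      (pairsB_nodup.filter _)]
  intro z
  simp only [List.mem_map, List.mem_filter]
  constructor
  · rintro ⟨w, ⟨hmem, hp⟩, rfl⟩
    rw [mem_pairsA] at hmem
    unfold predA at hp
    unfold phi predB
    simp only [decide_eq_true_eq] at hp ⊢
    rw [mem_pairsB]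
    have heq : w.1 + w.2 - w.1 = w.2 := by ring
    refine ⟨⟨by simp; omega, by simp; omega, by simp; omega, by simp; omega, by simp; omega⟩, ?_⟩
    simp only [heq]
    exact hp
  · rintro ⟨hmem, hp⟩
    rw [mem_pairsB] at hmem
    unfold predB at hp
    simp only [decide_eq_true_eq] at hp
    refine ⟨(z.2, z.1 - z.2), ⟨?_, ?_⟩, ?_⟩
    · rw [mem_pairsA]
      simp only
      omega
    · unfold predA
      simp only [decide_eq_true_eq]
      have heq : z.2 + (z.1 - z.2) = z.1 := by ring
      rw [heq]
      exact hp
    · unfold phi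
      simp only
      have heq : z.2 + (z.1 - z.2) = z.1 := by ring
      rw [heq]

-- ===== VERDICT (by name: the statement is the Claim_ definition above) =====
theorem count_equations_spec : Claim_equal_count_equations := by
  intro budget _
  unfold Spec_count_equations
  by_cases h : budget - 4 ≤ 0
  · show (if budget - 4 ≤ 0 then (0:Int) else _) = (if budget - 4 ≤ 0 then (0:Int) else _)
    rw [if_pos h, if_pos h]
  · have hr : 0 < budget - 4 := by omega
    rw [portA_count budget hr, portB_count budget hr]
    have hlen := (filters_perm (budget - 4)).length_eq
    rw [List.length_map] at hlen
    rw [List.countP_eq_length_filter, List.countP_eq_length_filter, hlen]
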